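-- pv_equiv track=rewrite | github.com/souravs17031999/100dayscodingchallenge | maximum_character_between_two_same_chars.py | max_char
-- ===== SOURCE A (Python) =====
-- def max_char(s):
--     max_char = ord(s[0])  # ord is used to get ASCII value as temp array is based on this ascii values
--     # find max value of all ASCii values
--     for i in s:
--         if max_char < ord(i):
--             max_char = ord(i)
--     # now inialize the array so that we get a array of size which includes the maxiumim element till then
--     count = [-1 for _ in range(max_char)]
--     # storing our max no in this variable - result_max
--     result_max = count[0]
--     for i in range(len(s)):
--         # this will be -1 if not seen , otherwise anything but -1 if already been seen.
--         first_idx = count[ord(s[i]) - 1]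
--         # not been seen, set its first index
--         if first_idx == -1:
--             count[ord(s[i]) - 1] = i
--         else:
--         # already seen, so simply check if we need to update our max and do if required
--             result_max = max(result_max, i - first_idx - 1)
--     return result_max
-- ===== SOURCE B (Python) =====
-- def max_char(s):
--     result = -1
--     n = len(s)
--     rev = s[::-1]
--     for c in set(s):
--         last = n - 1 - rev.index(c)
--         result = max(result, last - s.index(c) - 1)
--     return result
-- ===== Notes on version B (the rewrite author's own statement) =====
-- stated objective: simpler
-- what changed: Replaces the ASCII-max scan plus sentinel array of first indices and the indexed Python-level pass by a running max over the distinct characters of last-first-1, taken from first occurrences in the string and its reverse (C-level str.index scans), so no array sized by the max code is built.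
-- outside the precondition, e.g. on max_char(''): A raises IndexError, B returns -1
-- crash fix: On the empty string A raises IndexError (it reads s[0]); B returns -1. — e.g. on max_char(""): A raises IndexError, B returns -1
import Mathlib
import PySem

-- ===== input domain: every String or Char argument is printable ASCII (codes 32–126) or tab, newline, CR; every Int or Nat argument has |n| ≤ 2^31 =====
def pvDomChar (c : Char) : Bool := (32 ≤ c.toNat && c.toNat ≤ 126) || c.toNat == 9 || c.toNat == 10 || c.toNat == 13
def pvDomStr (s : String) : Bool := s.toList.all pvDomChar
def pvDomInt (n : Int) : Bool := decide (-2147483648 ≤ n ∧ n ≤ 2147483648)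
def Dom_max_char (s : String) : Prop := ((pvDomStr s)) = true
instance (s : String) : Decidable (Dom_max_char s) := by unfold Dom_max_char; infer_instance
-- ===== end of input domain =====

-- B replaces A's max-ASCII scan + sentinel array of first indices by a running max over the
-- distinct characters of last-first-1 distances (objective: simpler).

-- ===== PORT A =====
def max_char (s : String) : Int :=
  match PySem.Str.pyGet? s 0 with
  | none => 0   -- ord(s[0]) raises IndexError on the empty string; excluded by Pre_max_char
  | some c0 =>
    let m : Int :=
      s.toList.foldl (fun mc i => if mc < (i.toNat : Int) then (i.toNat : Int) else mc) (c0.toNat : Int)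
    let count : List Int := (PySem.List.pyRange 0 m 1).map (fun _ => (-1 : Int))
    let result : Int := PySem.List.pyGetD count 0 0
    let st :=
      (PySem.List.pyRange 0 (s.toList.length : Int) 1).foldl
        (fun (st : List Int × Int) i =>
          let ch : Int := ((PySem.List.pyGetD s.toList i ' ').toNat : Int)
          let first_idx := PySem.List.pyGetD st.1 (ch - 1) 0
          if first_idx = -1 then (PySem.List.pySetD st.1 (ch - 1) i, st.2)
          else (st.1, max st.2 (i - first_idx - 1)))
        (count, result)
    st.2

-- ===== PORT B =====
def max_char_alt (s : String) : Int :=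
  let l := s.toList
  let n : Int := l.length
  let rev : List Char := (PySem.List.slice? l none none (-1)).getD []   -- s[::-1]
  (PySem.Set.ofList l).foldl
    (fun r c =>
      let last : Int := n - 1 - (((PySem.List.index? rev c).getD 0 : Nat) : Int)
      max r (last - (((PySem.List.index? l c).getD 0 : Nat) : Int) - 1))
    (-1)

-- ===== PRECONDITION & SPEC =====
-- Pre_ excludes only the empty string, on which A raises IndexError (it reads s[0]).
def Pre_max_char (s : String) : Prop := s ≠ ""
instance (s : String) : Decidable (Pre_max_char s) := by unfold Pre_max_char; infer_instance
def pvWitness_max_char : String := "abcba"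

-- On the empty string A raises IndexError (it reads s[0]); B returns -1.
def Raises_max_char (s : String) : Prop := s = ""
instance (s : String) : Decidable (Raises_max_char s) := by unfold Raises_max_char; infer_instance
def pvRaiseWitness_max_char : String := ""
def pvRaiseWitnessOut_max_char : Int := -1

def Spec_max_char (s : String) (out : Int) : Prop := out = max_char_alt s
instance (s : String) (out : Int) : Decidable (Spec_max_char s out) := by unfold Spec_max_char; infer_instance

-- ===== CLAIM (what is proved, stated in full; the proofs are below) =====
def Claim_equal_max_char : Prop := ∀ (s : String), Dom_max_char s → Pre_max_char s → Spec_max_char s (max_char s)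
def Claim_raises_max_char : Prop := (∀ (s : String), Dom_max_char s → Raises_max_char s → ¬ Pre_max_char s) ∧ (Dom_max_char (pvRaiseWitness_max_char) ∧ Raises_max_char (pvRaiseWitness_max_char) ∧ max_char_alt (pvRaiseWitness_max_char) = pvRaiseWitnessOut_max_char)

-- ===== LEMMAS AND PROOFS =====

-- first-occurrence index of c in l (as Python int), 0 if absent
def fIdx (l : List Char) (c : Char) : Int := (((PySem.List.index? l c).getD 0 : Nat) : Int)
-- last-occurrence index of c in l, computed as in B via the reversed list
def lIdx (l : List Char) (c : Char) : Int :=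
  (l.length : Int) - 1 - (((PySem.List.index? l.reverse c).getD 0 : Nat) : Int)
-- the quantity B maximises per distinct character
def bval (l : List Char) (c : Char) : Int := lIdx l c - fIdx l c - 1

-- A's loop body, phrased on (index, char) pairs
def stepE (l : List Char) (st : List Int × Int) (p : Int × Char) : List Int × Int :=
  let ch : Int := ((p.2).toNat : Int)
  let first_idx := PySem.List.pyGetD st.1 (ch - 1) 0
  if first_idx = -1 then (PySem.List.pySetD st.1 (ch - 1) p.1, st.2)
  else (st.1, max st.2 (p.1 - first_idx - 1))

-- the pure content of A's loop: max over repeated positions of i - first - 1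
def pureStep (l : List Char) (r : Int) (p : Int × Char) : Int :=
  if p.2 ∈ l.take p.1.toNat then max r (p.1 - fIdx l p.2 - 1) else r

-- value A's count array holds for character c after k steps
def cntVal (l : List Char) (k : Nat) (c : Char) : Int :=
  match PySem.List.index? (l.take k) c with | some i => (i : Int) | none => -1

-- invariant of A's count array after k steps
def CntOk (l : List Char) (M : Int) (k : Nat) (cnt : List Int) : Prop :=
  cnt.length = M.toNat ∧ ∀ c ∈ l, cnt[c.toNat - 1]? = some (cntVal l k c)

lemma dom_code (s : String) (h : Dom_max_char s) : ∀ c ∈ s.toList, 9 ≤ c.toNat := by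
  intro c hc
  have h' := (List.all_eq_true.mp h) c hc
  unfold pvDomChar at h'
  simp only [Bool.or_eq_true, Bool.and_eq_true, decide_eq_true_eq, beq_iff_eq] at h'
  omega

lemma fIdx_spec (l : List Char) (c : Char) (hc : c ∈ l) :
    ∃ f : Nat, fIdx l c = (f : Int) ∧ ∃ hf : f < l.length,
      l[f] = c ∧ ∀ j (_ : j < f), l[j] ≠ c := by
  rcases Option.isSome_iff_exists.mp ((PySem.List.index?_isSome_iff l c).mpr hc) with ⟨f, hf⟩
  rcases PySem.List.getElem_of_index?_eq_some hf with ⟨hflt, hfc, hmin⟩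
  exact ⟨f, by simp only [fIdx, hf, Option.getD_some], hflt, hfc, hmin⟩

lemma lIdx_spec (l : List Char) (c : Char) (hc : c ∈ l) :
    ∃ g : Nat, lIdx l c = (g : Int) ∧ ∃ hg : g < l.length,
      l[g] = c ∧ ∀ j (_ : j < l.length), g < j → l[j] ≠ c := by
  have hcr : c ∈ l.reverse := List.mem_reverse.mpr hc
  rcases Option.isSome_iff_exists.mp ((PySem.List.index?_isSome_iff l.reverse c).mpr hcr) with ⟨rj, hrj⟩
  rcases PySem.List.getElem_of_index?_eq_some hrj with ⟨hrlt, hrc, hmin⟩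
  have hlen : l.reverse.length = l.length := List.length_reverse
  refine ⟨l.length - 1 - rj, ?_, ?_, ?_, ?_⟩
  · simp only [lIdx, hrj, Option.getD_some]
    omega
  · omega
  · rw [List.getElem_reverse] at hrc
    exact hrc
  · intro j hj hgj
    have hj' : l.length - 1 - j < rj := by omega
    have := hmin (l.length - 1 - j) hj'
    rw [List.getElem_reverse] at this
    have heq : l.length - 1 - (l.length - 1 - j) = j := by omega
    simp only [heq] at this
    exact this

lemma le_lIdx (l : List Char) (c : Char) (i : Nat) (hi : i < l.length) (hc : l[i] = c) :
    (i : Int) ≤ lIdx l c := by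
  have hc' : c ∈ l := hc ▸ List.getElem_mem hi
  rcases lIdx_spec l c hc' with ⟨g, hg, hglt, hgc, hmax⟩
  rw [hg]
  by_contra h
  exact hmax i hi (by omega) hc

lemma pure_base_le (l : List Char) :
    ∀ (ps : List (Int × Char)) (r : Int), r ≤ ps.foldl (pureStep l) r := by
  intro ps
  induction ps with
  | nil => intro r; simp
  | cons p t ih =>
    intro r
    refine le_trans ?_ (ih (pureStep l r p))
    unfold pureStep; split <;> simp

lemma pure_val_le (l : List Char) :
    ∀ (ps : List (Int × Char)) (r : Int) (p : Int × Char), p ∈ ps →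
      p.2 ∈ l.take p.1.toNat → p.1 - fIdx l p.2 - 1 ≤ ps.foldl (pureStep l) r := by
  intro ps
  induction ps with
  | nil => intro r p h; simp at h
  | cons q t ih =>
    intro r p hp hmem
    rcases List.mem_cons.mp hp with h | h
    · subst h
      refine le_trans ?_ (pure_base_le l t (pureStep l r p))
      unfold pureStep
      rw [if_pos hmem]
      exact le_max_right _ _
    · exact ih (pureStep l r q) p h hmem

lemma pure_le (l : List Char) :
    ∀ (ps : List (Int × Char)) (r b : Int), r ≤ b →
      (∀ p ∈ ps, p.2 ∈ l.take p.1.toNat → p.1 - fIdx l p.2 - 1 ≤ b) →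
      ps.foldl (pureStep l) r ≤ b := by
  intro ps
  induction ps with
  | nil => intro r b h _; simpa using h
  | cons q t ih =>
    intro r b hr hall
    refine ih (pureStep l r q) b ?_ (fun p hp => hall p (List.mem_cons_of_mem _ hp))
    unfold pureStep
    split
    · exact max_le hr (hall q (List.mem_cons_self) (by assumption))
    · exact hr

lemma maxfold_le (l : List Char) :
    ∀ (xs : List Char) (r b : Int), r ≤ b → (∀ c ∈ xs, bval l c ≤ b) →
      xs.foldl (fun r c => max r (bval l c)) r ≤ b := by
  intro xs
  induction xs with
  | nil => intro r b h _; simpa using h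
  | cons c t ih =>
    intro r b hr hall
    exact ih _ b (max_le hr (hall c List.mem_cons_self))
      (fun c' hc' => hall c' (List.mem_cons_of_mem _ hc'))

lemma char_toNat_inj (c c' : Char) (h : c.toNat = c'.toNat) : c = c' := by
  have h1 : Char.ofNat c.toNat = Char.ofNat c'.toNat := congrArg Char.ofNat h
  rwa [Char.ofNat_toNat, Char.ofNat_toNat] at h1

lemma take_split (l : List Char) (c : Char) (t' : List Char) (k : Nat)
    (hsplit : l = l.take k ++ c :: t') :
    k < l.length ∧ (l.take k).length = k ∧ l[k]? = some c ∧ l.take (k+1) = l.take k ++ [c] := by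
  have hlen := congrArg List.length hsplit
  simp only [List.length_append, List.length_take, List.length_cons] at hlen
  have hkl : k < l.length := by omega
  have htkl : (l.take k).length = k := by simp [List.length_take]; omega
  have hgk : l[k]? = some c := by
    conv_lhs => rw [hsplit]
    rw [List.getElem?_append_right (by omega)]
    simp [htkl]
  refine ⟨hkl, htkl, hgk, ?_⟩
  rw [List.take_add_one, hgk]
  rfl

lemma cntVal_succ (l : List Char) (k : Nat) (c c' : Char)
    (htake1 : l.take (k+1) = l.take k ++ [c])
    (h : c' ≠ c ∨ c ∈ l.take k) : cntVal l (k+1) c' = cntVal l k c' := by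
  unfold cntVal
  rw [htake1]
  by_cases hmem : c' ∈ l.take k
  · rw [PySem.List.index?_append_of_mem _ hmem]
  · have hne : c' ≠ c := by
      rcases h with h | h
      · exact h
      · intro he; exact hmem (he ▸ h)
    rw [(PySem.List.index?_eq_none_iff _ _).mpr hmem,
        (PySem.List.index?_eq_none_iff _ _).mpr (by simp [hne, hmem])]

lemma loop_snd (l : List Char) (hDom : ∀ c ∈ l, 9 ≤ c.toNat) (M : Int)
    (hM : ∀ c ∈ l, (c.toNat : Int) ≤ M) :
    ∀ (t : List Char) (k : Nat) (cnt : List Int) (r : Int),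
      l = l.take k ++ t → CntOk l M k cnt →
      ((PySem.List.enumerate t (k : Int)).foldl (stepE l) (cnt, r)).2
        = (PySem.List.enumerate t (k : Int)).foldl (pureStep l) r := by
  intro t
  induction t with
  | nil => intro k cnt r _ _; simp [PySem.List.enumerate_nil]
  | cons c t' ih =>
    intro k cnt r hsplit hcnt
    obtain ⟨hlen, hcells⟩ := hcnt
    obtain ⟨hkl, htkl, hgk, htake1⟩ := take_split l c t' k hsplit
    have hcl : c ∈ l := by rw [hsplit]; simp
    have hcode : 9 ≤ c.toNat := hDom c hcl
    have hcM : (c.toNat : Int) ≤ M := hM c hcl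
    have hjM : c.toNat - 1 < M.toNat := by omega
    have hsplit' : l = l.take (k+1) ++ t' := by
      rw [htake1, List.append_assoc]
      simpa using hsplit
    have hk1 : ((k : Int) + 1) = (((k + 1 : Nat)) : Int) := by push_cast; ring
    rw [PySem.List.enumerate_cons, hk1]
    simp only [List.foldl_cons]
    have hidx : ((c.toNat : Int) - 1) = (((c.toNat - 1 : Nat)) : Int) := by omega
    have hlook : PySem.List.pyGetD cnt ((c.toNat : Int) - 1) 0 = cntVal l k c := by
      rw [hidx, PySem.List.pyGetD_natCast, List.getD_eq_getElem?_getD, hcells c hcl]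
      rfl
    by_cases hmem : c ∈ l.take k
    · -- already seen: cnt unchanged, r updated
      obtain ⟨i, hi⟩ := Option.isSome_iff_exists.mp ((PySem.List.index?_isSome_iff _ _).mpr hmem)
      have hcv : cntVal l k c = (i : Int) := by unfold cntVal; rw [hi]
      have hfi : fIdx l c = (i : Int) := by
        have : PySem.List.index? l c = some i := by
          conv_lhs => rw [hsplit]
          rw [PySem.List.index?_append_of_mem _ hmem]
          exact hi
        simp only [fIdx, this, Option.getD_some]
      have hstep : stepE l (cnt, r) ((k : Int), c) = (cnt, max r ((k : Int) - (i : Int) - 1)) := by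
        simp only [stepE, hlook, hcv]
        rw [if_neg (by omega)]
      have hpure : pureStep l r ((k : Int), c) = max r ((k : Int) - (i : Int) - 1) := by
        simp only [pureStep, Int.toNat_natCast]
        rw [if_pos hmem, hfi]
      rw [hstep, hpure]
      exact ih (k + 1) cnt _ hsplit'
        ⟨hlen, fun c' hc' => by
          rw [hcells c' hc', cntVal_succ l k c c' htake1 (Or.inr hmem)]⟩
    · -- first sighting: record index k, r unchanged
      have hcv : cntVal l k c = -1 := by
        unfold cntVal
        rw [(PySem.List.index?_eq_none_iff _ _).mpr hmem]
      have hstep : stepE l (cnt, r) ((k : Int), c)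
          = (cnt.set (c.toNat - 1) (k : Int), r) := by
        simp only [stepE, hlook, hcv, if_true]
        rw [hidx, PySem.List.pySetD_natCast]
      have hpure : pureStep l r ((k : Int), c) = r := by
        simp only [pureStep, Int.toNat_natCast]
        rw [if_neg hmem]
      rw [hstep, hpure]
      refine ih (k + 1) _ r hsplit' ⟨by simpa using hlen, fun c' hc' => ?_⟩
      by_cases hcc : c' = c
      · subst hcc
        rw [List.getElem?_set, if_pos rfl, if_pos (by omega)]
        unfold cntVal
        rw [htake1, PySem.List.index?_append_singleton_self _ _ hmem, htkl]
      · have hne : c.toNat - 1 ≠ c'.toNat - 1 := by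
          intro he
          have : c.toNat = c'.toNat := by
            have := hDom c' hc'
            omega
          exact hcc (char_toNat_inj c c' this).symm
        rw [List.getElem?_set, if_neg hne, hcells c' hc',
            cntVal_succ l k c c' htake1 (Or.inl hcc)]

lemma maxA_eq_pure (s : String) (hDom : Dom_max_char s) (hne : s ≠ "") :
    max_char s = (PySem.List.enumerate s.toList 0).foldl (pureStep s.toList) (-1) := by
  have hcode := dom_code s hDom
  obtain ⟨c0, rest, hl⟩ : ∃ c0 rest, s.toList = c0 :: rest := by
    cases h : s.toList with
    | nil => exact absurd (by rwa [← String.toList_eq_nil_iff]) hne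
    | cons a b => exact ⟨a, b, rfl⟩
  have h0 : PySem.Str.pyGet? s 0 = some c0 := by
    rw [show (0 : Int) = ((0 : Nat) : Int) from rfl]
    simp [hl]
  have hfun : (fun (mc : Int) (i : Char) => if mc < (i.toNat : Int) then (i.toNat : Int) else mc)
      = (fun (mc : Int) (i : Char) => max mc (i.toNat : Int)) := by
    funext mc i
    rw [max_def]
    split_ifs <;> omega
  unfold max_char
  rw [h0]
  dsimp only
  rw [hfun]
  set l := s.toList with hlL
  set M := l.foldl (fun mc i => max mc (i.toNat : Int)) (c0.toNat : Int) with hM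
  have hMb : ∀ c ∈ l, (c.toNat : Int) ≤ M :=
    (PySem.List.le_foldl_max_int l (fun i => (i.toNat : Int)) (c0.toNat : Int)).2
  have hM0 : (c0.toNat : Int) ≤ M :=
    (PySem.List.le_foldl_max_int l (fun i => (i.toNat : Int)) (c0.toNat : Int)).1
  have hc0l : c0 ∈ l := by rw [hl]; simp
  have hM9 : 9 ≤ M.toNat := by
    have := hcode c0 hc0l
    omega
  set count := (PySem.List.pyRange 0 M 1).map (fun _ => (-1 : Int)) with hcount
  have hclen : count.length = M.toNat := by
    simp [hcount, PySem.List.length_pyRange_one]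
  have hcells : ∀ c ∈ l, count[c.toNat - 1]? = some (-1 : Int) := by
    intro c hc
    have h1 : c.toNat - 1 < M.toNat := by
      have := hMb c hc
      have := hcode c hc
      omega
    simp [hcount, h1]
  have hres : PySem.List.pyGetD count 0 0 = -1 := by
    rw [show (0 : Int) = ((0 : Nat) : Int) from rfl, PySem.List.pyGetD_natCast,
        List.getD_eq_getElem?_getD]
    have h1 : count[0]? = some (-1 : Int) := by
      have h2 : 0 < count.length := by omega
      rw [List.getElem?_eq_getElem h2]
      simp [hcount]
    rw [h1]
    rfl
  rw [hres]
  have hfoldE :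
      (PySem.List.pyRange 0 ((l.length : Int)) 1).foldl
        (fun (st : List Int × Int) i =>
          let ch : Int := ((PySem.List.pyGetD l i ' ').toNat : Int)
          let first_idx := PySem.List.pyGetD st.1 (ch - 1) 0
          if first_idx = -1 then (PySem.List.pySetD st.1 (ch - 1) i, st.2)
          else (st.1, max st.2 (i - first_idx - 1)))
        (count, -1)
      = (PySem.List.enumerate l 0).foldl (stepE l) (count, -1) := by
    rw [PySem.List.enumerate_eq_map_pyRange l ' ', List.foldl_map]
    rfl
  rw [hfoldE]
  have hcnt0 : CntOk l M 0 count := by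
    refine ⟨hclen, fun c hc => ?_⟩
    rw [hcells c hc]
    unfold cntVal
    rw [(PySem.List.index?_eq_none_iff _ _).mpr (by simp)]
  have := loop_snd l (fun c hc => hcode c hc) M hMb l 0 count (-1) (by simp) hcnt0
  rw [show ((0 : Nat) : Int) = (0 : Int) from rfl] at this
  exact this

lemma maxB_eq (s : String) :
    max_char_alt s
      = (PySem.Set.ofList s.toList).foldl (fun r c => max r (bval s.toList c)) (-1) := by
  simp only [max_char_alt, bval, lIdx, fIdx, PySem.List.slice?_none_none_neg_one, Option.getD_some]

-- ===== VERDICT (by name: the statement is the Claim_ definition above) =====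
theorem max_char_spec : Claim_equal_max_char := by
  intro s hDom hPre
  unfold Spec_max_char
  rw [maxA_eq_pure s hDom hPre, maxB_eq s]
  set l := s.toList with hl
  have hcode := dom_code s hDom
  apply le_antisymm
  · -- A ≤ B
    apply pure_le
    · exact (PySem.List.le_foldl_max_int (PySem.Set.ofList l) (bval l) (-1)).1
    · intro p hp hmem
      rcases (PySem.List.mem_enumerate_iff l 0 p).mp hp with ⟨k, hk, hpk⟩
      subst hpk
      simp only [zero_add]
      have hcl : l[k] ∈ l := List.getElem_mem hk
      have h1 : (k : Int) ≤ lIdx l l[k] := le_lIdx l l[k] k hk rfl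
      have h2 : bval l l[k] ≤ (PySem.Set.ofList l).foldl (fun r c => max r (bval l c)) (-1) :=
        (PySem.List.le_foldl_max_int (PySem.Set.ofList l) (bval l) (-1)).2 _
          ((PySem.Set.mem_ofList l _).mpr hcl)
      have h3 : (k : Int) - fIdx l l[k] - 1 ≤ bval l l[k] := by unfold bval; omega
      exact le_trans h3 h2
  · -- B ≤ A
    apply maxfold_le
    · exact pure_base_le l _ _
    · intro c hc
      have hcl : c ∈ l := (PySem.Set.mem_ofList l c).mp hc
      rcases fIdx_spec l c hcl with ⟨f, hf, hflt, hfc, _⟩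
      rcases lIdx_spec l c hcl with ⟨g, hg, hglt, hgc, _⟩
      have hfg : f ≤ g := by
        have := le_lIdx l c f hflt hfc
        omega
      rcases Nat.lt_or_ge f g with hlt | hge
      · -- repeated: the pure fold sees position g with c already in take g
        have hmem : c ∈ l.take g := by
          have hfl : f < (l.take g).length := by simp [List.length_take]; omega
          have hfg' : (l.take g)[f]'hfl = c := by simpa [List.getElem_take] using hfc
          exact hfg' ▸ List.getElem_mem hfl
        have hpair : ((g : Int), c) ∈ PySem.List.enumerate l 0 := by
          rw [PySem.List.mem_enumerate_iff]
          exact ⟨g, hglt, by simp [hgc]⟩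
        have hv := pure_val_le l (PySem.List.enumerate l 0) (-1) ((g : Int), c) hpair
          (by simpa using hmem)
        unfold bval
        simpa [hg, hf] using hv
      · -- unique: bval = -1
        have : f = g := le_antisymm hfg hge
        unfold bval
        rw [hf, hg, this]
        have := pure_base_le l (PySem.List.enumerate l 0) (-1)
        omega

@[simp] theorem max_char_raises : Claim_raises_max_char := by
  unfold Claim_raises_max_char
  exact ⟨fun s _ h hp => hp h, by decide⟩
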